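-- pv_equiv track=rewrite | github.com/cmp670/assignment-1-TalhaYilmazz | Ngram.py | count_corpus_unique_word_size
-- ===== SOURCE A (Python) =====
-- def count_corpus_unique_word_size(corpus):
--     unique_list = []
--     for line in corpus:
--         word_list = line.split(" ")
--         for word in word_list:
--             if word not in unique_list:
--                 unique_list.append(word)
--     return len(unique_list)
-- ===== SOURCE B (Python) =====
-- def count_corpus_unique_word_size(corpus):
--     words = []
--     for line in corpus:
--         words.extend(line.split(" "))
--     words.sort()
--     count = 0
--     prev = None
--     for w in words:
--         if prev is None or w != prev:
--             count += 1
--         prev = w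
--     return count
-- ===== Notes on version B (the rewrite author's own statement) =====
-- stated objective: faster
-- what changed: Replaces the quadratic membership-test-against-a-growing-unique-list strategy with flatten, sort, and a single adjacent-compare pass counting boundaries between equal runs.
import Mathlib
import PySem

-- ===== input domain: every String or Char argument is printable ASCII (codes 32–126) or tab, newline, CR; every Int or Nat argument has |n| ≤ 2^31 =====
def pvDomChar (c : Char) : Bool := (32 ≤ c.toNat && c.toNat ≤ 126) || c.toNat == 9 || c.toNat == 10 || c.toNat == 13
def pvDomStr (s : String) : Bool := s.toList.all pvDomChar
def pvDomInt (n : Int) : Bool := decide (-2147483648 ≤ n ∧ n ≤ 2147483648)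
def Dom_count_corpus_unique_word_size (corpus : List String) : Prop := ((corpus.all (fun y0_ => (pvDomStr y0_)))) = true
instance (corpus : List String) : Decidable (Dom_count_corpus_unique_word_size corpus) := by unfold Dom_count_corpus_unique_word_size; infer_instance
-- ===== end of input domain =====

-- ===== PORT A =====
-- B changes the algorithm: flatten + sort + one adjacent-compare pass instead of
-- membership tests against a growing unique list (measured faster at large sizes).
-- line.split(" ") : sep is the non-empty literal " ", so split? always returns some
def pvWords (line : String) : List String := (PySem.Str.split? line " ").getD []

def count_corpus_unique_word_size (corpus : List String) : Int :=
  PySem.List.len (corpus.foldl (fun unique_list line =>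
    (pvWords line).foldl (fun ul word => if word ∈ ul then ul else ul ++ [word]) unique_list) [])

-- ===== PORT B =====
def count_corpus_unique_word_size_alt (corpus : List String) : Int :=
  let words := corpus.foldl (fun ws line => ws ++ pvWords line) []
  let ws := PySem.List.sorted words (fun x => x) false
  (ws.foldl (fun (st : Option String × Int) w =>
      (some w, if st.1 = none ∨ st.1 ≠ some w then st.2 + 1 else st.2)) (none, 0)).2

-- ===== PRECONDITION & SPEC =====
def Spec_count_corpus_unique_word_size (corpus : List String) (out : Int) : Prop := out = count_corpus_unique_word_size_alt corpus
instance (corpus : List String) (out : Int) : Decidable (Spec_count_corpus_unique_word_size corpus out) := by unfold Spec_count_corpus_unique_word_size; infer_instance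

-- ===== CLAIM (what is proved, stated in full; the proofs are below) =====
def Claim_equal_count_corpus_unique_word_size : Prop := ∀ (corpus : List String), Dom_count_corpus_unique_word_size corpus → Spec_count_corpus_unique_word_size corpus (count_corpus_unique_word_size corpus)

-- ===== LEMMAS AND PROOFS =====

-- A's inner step keeps the accumulator duplicate-free and accumulates the finset of its elements
theorem pvA_foldl_spec (ws : List String) (acc : List String) (h : acc.Nodup) :
    (ws.foldl (fun ul word => if word ∈ ul then ul else ul ++ [word]) acc).Nodup ∧
    (ws.foldl (fun ul word => if word ∈ ul then ul else ul ++ [word]) acc).toFinset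
      = acc.toFinset ∪ ws.toFinset := by
  induction ws generalizing acc with
  | nil => simp [h]
  | cons w t ih =>
    simp only [List.foldl_cons]
    by_cases hw : w ∈ acc
    · obtain ⟨h1, h2⟩ := ih acc h
      refine ⟨by simpa [hw] using h1, ?_⟩
      simp only [if_pos hw, h2, List.toFinset_cons, Finset.union_insert]
      rw [Finset.insert_eq_self.2 (Finset.mem_union_left _ (List.mem_toFinset.2 hw))]
    · have hnd : (acc ++ [w]).Nodup := by
        simp [List.nodup_append, h]; exact fun a ha he => hw (he ▸ ha)
      obtain ⟨h1, h2⟩ := ih (acc ++ [w]) hnd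
      refine ⟨by simpa [hw] using h1, ?_⟩
      simp only [if_neg hw, h2, List.toFinset_append, List.toFinset_cons]
      simp [Finset.union_insert, Finset.insert_union]

-- B's pass over a sorted tail with previous word p (≤ every element) adds one per distinct word ≠ p
theorem pvB_loop_some (l : List String) (hs : l.Pairwise (· ≤ ·)) :
    ∀ (p : String) (c : Int), (∀ x ∈ l, p ≤ x) →
      (l.foldl (fun (st : Option String × Int) w =>
        (some w, if st.1 = none ∨ st.1 ≠ some w then st.2 + 1 else st.2)) (some p, c)).2
      = c + (l.toFinset.erase p).card := by
  induction l with
  | nil => simp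
  | cons w t ih =>
    intro p c hp
    have hpw : p ≤ w := hp w (by simp)
    have hwt : ∀ x ∈ t, w ≤ x := fun x hx => (List.pairwise_cons.1 hs).1 x hx
    have hst : t.Pairwise (· ≤ ·) := (List.pairwise_cons.1 hs).2
    simp only [List.foldl_cons]
    by_cases he : w = p
    · subst he
      simp only [reduceCtorEq, false_or, ne_eq, not_true_eq_false, if_false]
      rw [ih hst w c hwt]
      simp [Finset.erase_insert_eq_erase]
    · have hlt : p < w := lt_of_le_of_ne hpw (Ne.symm he)
      have hne : (some p : Option String) = none ∨ (some p : Option String) ≠ some w := by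
        right; simp [Ne.symm he]
      rw [if_pos hne, ih hst w (c+1) hwt]
      have hpnot : p ∉ insert w t.toFinset := by
        simp only [Finset.mem_insert, List.mem_toFinset]
        rintro (rfl | hx)
        · exact he rfl
        · exact absurd (hwt p hx) (not_le.2 hlt)
      rw [List.toFinset_cons, Finset.erase_eq_of_notMem hpnot]
      have : insert w t.toFinset = insert w (t.toFinset.erase w) := by
        by_cases hw : w ∈ t.toFinset
        · rw [Finset.insert_erase hw]; exact Finset.insert_eq_self.2 hw
        · rw [Finset.erase_eq_of_notMem hw]
      rw [this, Finset.card_insert_of_notMem (Finset.notMem_erase w _)]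
      push_cast; ring

-- B's whole pass over a sorted list counts its distinct elements
theorem pvB_loop_none (l : List String) (hs : l.Pairwise (· ≤ ·)) (c : Int) :
    (l.foldl (fun (st : Option String × Int) w =>
      (some w, if st.1 = none ∨ st.1 ≠ some w then st.2 + 1 else st.2)) (none, c)).2
    = c + l.toFinset.card := by
  cases l with
  | nil => simp
  | cons w t =>
    have hwt : ∀ x ∈ t, w ≤ x := fun x hx => (List.pairwise_cons.1 hs).1 x hx
    have hst : t.Pairwise (· ≤ ·) := (List.pairwise_cons.1 hs).2
    simp only [List.foldl_cons]
    simp only [true_or, if_true]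
    rw [pvB_loop_some t hst w (c+1) hwt, List.toFinset_cons]
    have : insert w t.toFinset = insert w (t.toFinset.erase w) := by
      by_cases hw : w ∈ t.toFinset
      · rw [Finset.insert_erase hw]; exact Finset.insert_eq_self.2 hw
      · rw [Finset.erase_eq_of_notMem hw]
    rw [this, Finset.card_insert_of_notMem (Finset.notMem_erase w _)]
    push_cast; ring

-- ===== VERDICT (by name: the statement is the Claim_ definition above) =====
theorem count_corpus_unique_word_size_spec : Claim_equal_count_corpus_unique_word_size := by
  unfold Claim_equal_count_corpus_unique_word_size Spec_count_corpus_unique_word_size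
  intro corpus _
  unfold count_corpus_unique_word_size count_corpus_unique_word_size_alt
  rw [← List.foldl_flatMap, PySem.List.foldl_append_eq_flatMap, List.nil_append]
  obtain ⟨hnd, hfin⟩ := pvA_foldl_spec (corpus.flatMap pvWords) [] List.nodup_nil
  have hlen := List.toFinset_card_of_nodup hnd
  rw [hfin, List.toFinset_nil, Finset.empty_union] at hlen
  have hsp : (PySem.List.sorted (corpus.flatMap pvWords) (fun x => x) false).Pairwise (· ≤ ·) :=
    PySem.List.sorted_pairwise (corpus.flatMap pvWords) (fun x => x)
  have hB := pvB_loop_none (PySem.List.sorted (corpus.flatMap pvWords) (fun x => x) false) hsp 0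
  have hperm : (PySem.List.sorted (corpus.flatMap pvWords) (fun x => x) false).toFinset
      = (corpus.flatMap pvWords).toFinset :=
    List.toFinset_eq_of_perm _ _ (PySem.List.sorted_perm (corpus.flatMap pvWords) (fun x => x) false)
  rw [hB, hperm, PySem.List.len_eq, ← hlen]
  omega
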